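-- pv_equiv track=rewrite | github.com/hoffmanick/DataBUS_TiliaPollen | validators.py | validunits
-- ===== SOURCE A (Python) =====
-- def validunits (template, unitcols, units):
--     """_Are the units provided valid based on defined unit names?_
--
--     Args:
--         template (_list_): _The csv file content, as a list._
--         unitcols (_dict_): _The names of each set of columns listing units in the file, with a key linked to the `units` column._
--         units (_dict_): _Acceptable units for each data column type._
--
--     Returns:
--         _list_: _A list of columns with invalid units._
--     """
--     invalid = []
--     for i in unitcols.keys():
--         for j in unitcols[i]:
--             values = list(set(map(lambda x: x[j], template)))
--             values = list(filter(lambda x: x != '', values))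
--             valid = all([k in units[i] for k in values])
--             if valid == False:
--                 invalid.append(j)
--     return invalid
-- ===== SOURCE B (Python) =====
-- def validunits(template, unitcols, units):
--     # One row-major pass building per-column value sets, then a pure membership pass.
--     cols = [j for js in unitcols.values() for j in js]
--     seen = {}
--     for row in template:
--         for j in cols:
--             seen.setdefault(j, set()).add(row[j])
--     invalid = []
--     for i, js in unitcols.items():
--         allowed = set(units.get(i, [])) | {''}
--         for j in js:
--             if not seen.get(j, set()) <= allowed:
--                 invalid.append(j)
--     return invalid
-- ===== Notes on version B (the rewrite author's own statement) =====
-- stated objective: alternative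
-- what changed: Replaces A's per-(key,column) rebuild of the column value set from the whole template with a single row-major pass that builds a dict column->set of values, followed by a pure subset-check pass against units[i] plus the empty string.
import Mathlib
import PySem

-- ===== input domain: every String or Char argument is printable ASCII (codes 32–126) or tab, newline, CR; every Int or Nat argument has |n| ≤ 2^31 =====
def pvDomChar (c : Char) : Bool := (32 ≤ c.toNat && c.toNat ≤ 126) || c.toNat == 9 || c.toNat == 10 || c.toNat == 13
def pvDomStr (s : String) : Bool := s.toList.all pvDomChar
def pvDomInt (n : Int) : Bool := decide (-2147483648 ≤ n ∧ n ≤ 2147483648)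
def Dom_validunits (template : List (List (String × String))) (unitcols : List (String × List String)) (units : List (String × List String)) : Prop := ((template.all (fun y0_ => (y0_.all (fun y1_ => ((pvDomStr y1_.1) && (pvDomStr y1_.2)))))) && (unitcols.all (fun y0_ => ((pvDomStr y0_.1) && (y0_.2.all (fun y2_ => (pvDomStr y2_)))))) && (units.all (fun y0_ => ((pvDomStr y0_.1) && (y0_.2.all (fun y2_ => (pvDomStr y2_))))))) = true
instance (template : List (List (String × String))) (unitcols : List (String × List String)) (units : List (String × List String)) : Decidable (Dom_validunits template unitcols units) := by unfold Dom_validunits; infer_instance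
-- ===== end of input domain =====

-- B replaces A's per-(key,column) re-scan of the whole template by one row-major
-- index-building pass followed by a pure subset-check pass (alternative decomposition).


-- ===== PORT A =====
-- Literal port of A: for each key i of unitcols, for each column j, rebuild the
-- set of column-j values over the whole template, drop '', test them all against
-- units[i].  Row lookup x[j] and units[i] are KeyErrors in Python where the key is
-- missing — those inputs are excluded by Pre_ below, so getD's defaults are never used there.
def validunits (template : List (List (String × String))) (unitcols : List (String × List String)) (units : List (String × List String)) : List String :=
  let uc := PySem.Dict.ofList unitcols
  let u := PySem.Dict.ofList units
  uc.keys.foldl (fun invalid i =>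
    (uc.getD i []).foldl (fun invalid j =>
      let values := PySem.Set.ofList (template.map (fun x => (PySem.Dict.ofList x).getD j ""))
      let values2 := values.filter (fun x => decide (x ≠ ""))
      let valid := values2.all (fun k => (u.getD i []).contains k)
      if valid = false then invalid ++ [j] else invalid) invalid) []

-- ===== PORT B =====
-- Port of B (Source B): build `seen`, a dict column ↦ set of its values, in one pass
-- over the template rows; then append j whenever seen[j] ⊄ units.get(i, []) ∪ {''}.
def validunits_alt (template : List (List (String × String))) (unitcols : List (String × List String)) (units : List (String × List String)) : List String :=
  let uc := PySem.Dict.ofList unitcols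
  let u := PySem.Dict.ofList units
  let cols := uc.values.flatMap (fun js => js)
  let seen := template.foldl (fun d row =>
    cols.foldl (fun d j =>
      d.modify j [] (fun s => PySem.Set.add s ((PySem.Dict.ofList row).getD j ""))) d)
    PySem.Dict.empty
  uc.items.foldl (fun invalid p =>
    let allowed := PySem.Set.add (PySem.Set.ofList (u.getD p.1 [])) ""
    p.2.foldl (fun invalid j =>
      if PySem.Set.issubset (seen.getD j []) allowed = false then invalid ++ [j] else invalid)
      invalid) []

-- ===== PRECONDITION & SPEC =====
-- Pre_ excludes exactly the inputs where Python A raises a KeyError: a listed unit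
-- column j missing from some template row (x[j]), or a unitcols key i absent from
-- units while column i actually has a non-empty value (units[i] is only evaluated then).
def Pre_validunits (template : List (List (String × String))) (unitcols : List (String × List String)) (units : List (String × List String)) : Prop :=
  ∀ p ∈ (PySem.Dict.ofList unitcols).items, ∀ j ∈ p.2,
    (∀ row ∈ template, (PySem.Dict.ofList row).contains j = true) ∧
    ((∃ row ∈ template, (PySem.Dict.ofList row).getD j "" ≠ "") →
      (PySem.Dict.ofList units).contains p.1 = true)
instance (template : List (List (String × String))) (unitcols : List (String × List String)) (units : List (String × List String)) : Decidable (Pre_validunits template unitcols units) := by unfold Pre_validunits; infer_instance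

def pvWitness_validunits : (List (List (String × String))) × (List (String × List String)) × (List (String × List String)) :=
  ([[("col", "cm"), ("u", "mm")], [("col", ""), ("u", "cm")]],
   [("depth", ["col", "u"])],
   [("depth", ["cm", "m"])])

def Spec_validunits (template : List (List (String × String))) (unitcols : List (String × List String)) (units : List (String × List String)) (out : List String) : Prop := out = validunits_alt template unitcols units
instance (template : List (List (String × String))) (unitcols : List (String × List String)) (units : List (String × List String)) (out : List String) : Decidable (Spec_validunits template unitcols units out) := by unfold Spec_validunits; infer_instance

-- ===== CLAIM (what is proved, stated in full; the proofs are below) =====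
def Claim_equal_validunits : Prop := ∀ (template : List (List (String × String))) (unitcols : List (String × List String)) (units : List (String × List String)), Dom_validunits template unitcols units → Pre_validunits template unitcols units → Spec_validunits template unitcols units (validunits template unitcols units)

-- ===== LEMMAS AND PROOFS =====

-- Membership in the per-column set accumulated by one inner pass over `cols`.
lemma mem_getD_foldl_modify_add (cols : List String) (d : PySem.Dict String (PySem.Set String))
    (g : String → String) (c v : String) :
    v ∈ (cols.foldl (fun d j => d.modify j [] (fun s => PySem.Set.add s (g j))) d).getD c []
      ↔ v ∈ d.getD c [] ∨ (c ∈ cols ∧ v = g c) := by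
  induction cols generalizing d with
  | nil => simp
  | cons j rest ih =>
    simp only [List.foldl_cons, ih, PySem.Dict.getD_modify, List.mem_cons]
    by_cases hcj : c = j
    · subst hcj
      simp [PySem.Set.mem_add]
      tauto
    · simp [hcj]

-- Membership in the per-column set accumulated by the full row-major double pass.
lemma mem_seen (template : List (List (String × String))) (cols : List String)
    (d : PySem.Dict String (PySem.Set String)) (c v : String) :
    v ∈ (template.foldl (fun d row =>
          cols.foldl (fun d j =>
            d.modify j [] (fun s => PySem.Set.add s ((PySem.Dict.ofList row).getD j ""))) d) d).getD c []
      ↔ v ∈ d.getD c [] ∨ (c ∈ cols ∧ ∃ row ∈ template, v = (PySem.Dict.ofList row).getD c "") := by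
  induction template generalizing d with
  | nil => simp
  | cons row rest ih =>
    simp only [List.foldl_cons, ih, mem_getD_foldl_modify_add, List.mem_cons]
    aesop

-- The per-(i, j) decision of A equals the subset test of B, for any column j that
-- occurs in `cols` (B's flattened column list) and any allowed-unit list ui.
lemma cond_eq (template : List (List (String × String))) (cols : List String)
    (j : String) (hj : j ∈ cols) (ui : List String) :
    (((PySem.Set.ofList (template.map (fun x => (PySem.Dict.ofList x).getD j ""))).filter
        (fun x => decide (x ≠ ""))).all (fun k => ui.contains k))
      = PySem.Set.issubset
          ((template.foldl (fun d row =>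
              cols.foldl (fun d j =>
                d.modify j [] (fun s => PySem.Set.add s ((PySem.Dict.ofList row).getD j ""))) d)
            PySem.Dict.empty).getD j [])
          (PySem.Set.add (PySem.Set.ofList ui) "") := by
  rw [Bool.eq_iff_iff, List.all_eq_true, PySem.Set.issubset_iff]
  constructor
  · intro h v hv
    rw [mem_seen] at hv
    rcases hv with hv | ⟨_, row, hrow, rfl⟩
    · simp [PySem.Dict.getD_empty] at hv
    · by_cases he : (PySem.Dict.ofList row).getD j "" = ""
      · rw [PySem.Set.mem_add]; right; exact he
      · have := h _ (by
          rw [List.mem_filter, PySem.Set.mem_ofList]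
          exact ⟨List.mem_map.mpr ⟨row, hrow, rfl⟩, by simpa using he⟩)
        rw [PySem.Set.mem_add, PySem.Set.mem_ofList]
        left
        simpa using this
  · intro h v hv
    rw [List.mem_filter, PySem.Set.mem_ofList, List.mem_map] at hv
    rcases hv with ⟨⟨row, hrow, rfl⟩, hne⟩
    have hmem : (PySem.Dict.ofList row).getD j "" ∈ _ :=
      (mem_seen template cols PySem.Dict.empty j _).mpr
        (Or.inr ⟨hj, row, hrow, rfl⟩)
    have := h _ hmem
    rw [PySem.Set.mem_add, PySem.Set.mem_ofList] at this
    rcases this with hm | hm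
    · simpa using hm
    · exact absurd hm (by simpa using hne)

-- ===== VERDICT (by name: the statement is the Claim_ definition above) =====
theorem validunits_spec : Claim_equal_validunits := by
  intro template unitcols units _ _
  unfold Spec_validunits
  simp only [validunits, validunits_alt]
  set uc := PySem.Dict.ofList unitcols with huc
  set u := PySem.Dict.ofList units with hu
  set cols := uc.values.flatMap (fun js => js) with hcols
  rw [PySem.Dict.items_eq_map_keys uc (PySem.Dict.nodup_keys_ofList unitcols) [],
      List.foldl_map]
  apply PySem.List.foldl_congr_mem
  intro acc i hi
  apply PySem.List.foldl_congr_mem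
  intro acc2 j hj
  have hval : uc.getD i [] ∈ uc.values := by
    rw [PySem.Dict.values_eq_map_keys uc (PySem.Dict.nodup_keys_ofList unitcols) []]
    exact List.mem_map.mpr ⟨i, hi, rfl⟩
  have hjc : j ∈ cols := by
    rw [hcols, List.mem_flatMap]
    exact ⟨uc.getD i [], hval, hj⟩
  rw [cond_eq template cols j hjc (u.getD i [])]
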